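-- pv_equiv track=rewrite | github.com/pypi-data/pypi-mirror-87 | packages/lx/lx-0.102.tar.gz/lx-0.102/lx/__init__.py | lCsv
-- ===== SOURCE A (Python) =====
-- def lCsv(l, force_oneline=False):
--
--     if len(l) == 0:
--         return ""
--
--     if all([isinstance(e, (list, tuple)) for e in l]) and not force_oneline:
--         length = len(l[0])
--         if all([len(e) == length for e in l]):
--             return "\n".join([lCsv(e, force_oneline=True) for e in l])
--
--     return ", ".join([str(e) for e in l])
-- ===== SOURCE B (Python) =====
-- def lCsv(l, force_oneline=False):
--     # Single pass with an accumulator and a conditional separator,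
--     # instead of materialising a list of strings and joining it.
--     out = ""
--     for e in l:
--         if out != "":
--             out += ", "
--         out += str(e)
--     return out
-- ===== Notes on version B (the rewrite author's own statement) =====
-- stated objective: alternative
-- what changed: Replaces the build-all-strings-then-join formulation (with its dead recursive matrix branch, unreachable for int lists) by a single forward pass that folds a string accumulator with a conditional separator; the empty-list guard disappears since the empty fold already yields "".
import Mathlib
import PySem

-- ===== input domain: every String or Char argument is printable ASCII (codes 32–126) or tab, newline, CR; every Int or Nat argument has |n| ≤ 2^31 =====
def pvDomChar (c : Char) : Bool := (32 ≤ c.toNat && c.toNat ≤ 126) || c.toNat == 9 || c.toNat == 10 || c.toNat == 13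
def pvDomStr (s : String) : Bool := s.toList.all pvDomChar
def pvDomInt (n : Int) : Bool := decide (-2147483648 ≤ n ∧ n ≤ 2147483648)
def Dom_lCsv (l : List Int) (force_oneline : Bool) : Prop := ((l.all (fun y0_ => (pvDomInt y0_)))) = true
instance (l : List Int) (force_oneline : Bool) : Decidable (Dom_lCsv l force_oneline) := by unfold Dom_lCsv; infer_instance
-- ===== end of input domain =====

-- B replaces A's build-a-list-of-strings-then-join (with a dead matrix branch) by a
-- single fold over the list with a string accumulator and a conditional separator.
-- ===== PORT A =====
-- At type List Int every element fails isinstance(e, (list, tuple)), so A's matrix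
-- guard 'all([...]) and not force_oneline' is 'l.all (fun _ => false) && !force_oneline'
-- (false for any nonempty l); its body is unreachable and ported as "".
def lCsv (l : List Int) (force_oneline : Bool) : String :=
  if PySem.List.len l = 0 then ""
  else if (l.all (fun _ => false)) && !force_oneline then
    ""  -- unreachable matrix branch
  else
    PySem.Str.join ", " (l.map PySem.Int.toStr)

-- ===== PORT B =====
-- B: one forward pass; out = "" means "nothing emitted yet", so no empty-list guard.
def lCsv_alt (l : List Int) (force_oneline : Bool) : String :=
  l.foldl (fun out e =>
    (if out = "" then out else out ++ ", ") ++ PySem.Int.toStr e) ""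

-- ===== PRECONDITION & SPEC =====
def Spec_lCsv (l : List Int) (force_oneline : Bool) (out : String) : Prop := out = lCsv_alt l force_oneline
instance (l : List Int) (force_oneline : Bool) (out : String) : Decidable (Spec_lCsv l force_oneline out) := by unfold Spec_lCsv; infer_instance

-- ===== CLAIM (what is proved, stated in full; the proofs are below) =====
def Claim_equal_lCsv : Prop := ∀ (l : List Int) (force_oneline : Bool), Dom_lCsv l force_oneline → Spec_lCsv l force_oneline (lCsv l force_oneline)

-- ===== LEMMAS AND PROOFS =====

-- ===== VERDICT (by name: the statement is the Claim_ definition above) =====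
lemma toChars_ne_nil (x : Int) : PySem.Int.toChars x ≠ [] := by
  unfold PySem.Int.toChars
  split
  · simp
  · intro h
    have hl := Nat.length_toDigits_pos (b := 10) (n := x.toNat)
    rw [h] at hl
    simp at hl

lemma toStr_ne_empty (x : Int) : PySem.Int.toStr x ≠ "" := by
  intro h
  apply toChars_ne_nil x
  rw [← PySem.Int.toList_toStr, h]
  rfl

lemma append_ne_empty_left (a b : String) (ha : a ≠ "") : a ++ b ≠ "" := by
  intro h
  apply ha
  have h2 := congrArg String.toList h
  simp at h2
  apply String.toList_inj.mp
  simp [h2.1]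

-- the tail of the CSV string contributed by xs, after a nonempty prefix
def csvTail (xs : List Int) : String :=
  (xs.map (fun e => ", " ++ PySem.Int.toStr e)).foldr (· ++ ·) ""

lemma foldl_eq_append_csvTail : ∀ (xs : List Int) (acc : String), acc ≠ "" →
    xs.foldl (fun out e =>
      (if out = "" then out else out ++ ", ") ++ PySem.Int.toStr e) acc
    = acc ++ csvTail xs
  | [], acc, _ => by simp [csvTail]
  | x :: xs, acc, h => by
    have step : (if acc = "" then acc else acc ++ ", ") ++ PySem.Int.toStr x
        = acc ++ ", " ++ PySem.Int.toStr x := by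
      rw [if_neg h, String.append_assoc]
    simp only [List.foldl, step]
    rw [foldl_eq_append_csvTail xs (acc ++ ", " ++ PySem.Int.toStr x)
        (append_ne_empty_left _ _ (append_ne_empty_left _ _ h))]
    simp [csvTail, String.append_assoc]

lemma join_eq_head_csvTail : ∀ (x : Int) (xs : List Int),
    PySem.Str.join ", " ((x :: xs).map PySem.Int.toStr) = PySem.Int.toStr x ++ csvTail xs
  | x, [] => by
    apply String.toList_inj.mp
    simp [PySem.Str.toList_join, PySem.Chars.join_singleton, csvTail]
  | x, y :: ys => by
    have hj : PySem.Str.join ", " ((x :: y :: ys).map PySem.Int.toStr)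
        = PySem.Int.toStr x ++ ", " ++ PySem.Str.join ", " ((y :: ys).map PySem.Int.toStr) := by
      apply String.toList_inj.mp
      simp [PySem.Str.toList_join, PySem.Chars.join_cons_cons]
    rw [hj, join_eq_head_csvTail y ys]
    simp [csvTail, String.append_assoc]

theorem lCsv_spec : Claim_equal_lCsv := by
  intro l f _
  unfold Spec_lCsv
  cases l with
  | nil => rfl
  | cons x xs =>
    have h1 : lCsv (x :: xs) f = PySem.Str.join ", " (List.map PySem.Int.toStr (x :: xs)) := by
      show (if PySem.List.len (x :: xs) = 0 then "" else _) = _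
      rw [if_neg (by simp [PySem.List.len]; omega)]
      simp
    rw [h1, join_eq_head_csvTail x xs]
    simp only [lCsv_alt, List.foldl]
    rw [if_pos trivial]
    simp only [String.empty_append]
    rw [foldl_eq_append_csvTail xs (PySem.Int.toStr x) (toStr_ne_empty x)]
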